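-- pv_equiv track=rewrite | github.com/profitmonk/high-intent-signals | utils/helpers.py | is_valid_ticker
-- ===== SOURCE A (Python) =====
-- def is_valid_ticker(ticker: str) -> bool:
--     """
--     Validate a stock ticker symbol.
--
--     Args:
--         ticker: Ticker symbol to validate
--
--     Returns:
--         True if valid
--     """
--     if not ticker or not isinstance(ticker, str):
--         return False
--
--     # Basic validation: 1-5 uppercase letters, optionally with a dot and letter
--     ticker = ticker.upper()
--     if len(ticker) > 6:
--         return False
--
--     # Allow patterns like "BRK.B"
--     parts = ticker.split(".")
--     if len(parts) > 2:
--         return False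
--
--     for part in parts:
--         if not part.isalpha():
--             return False
--
--     return True
-- ===== SOURCE B (Python) =====
-- def is_valid_ticker(ticker: str) -> bool:
--     """Single-pass validation: dot counter + current segment length (no parts list)."""
--     if not ticker or not isinstance(ticker, str):
--         return False
--     if len(ticker) > 6:
--         return False
--     seen_dot = False
--     seg = 0
--     for ch in ticker:
--         if ch == '.':
--             if seen_dot or seg == 0:
--                 return False
--             seen_dot = True
--             seg = 0
--         elif ch.isalpha():
--             seg += 1
--         else:
--             return False
--     return seg > 0
-- ===== Notes on version B (the rewrite author's own statement) =====
-- stated objective: alternative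
-- what changed: Replaces upper() + dot-splitting + per-part isalpha with a single character scan maintaining a dot flag and the current segment length, never building a parts list (and skipping the case conversion, which cannot affect the result).
import Mathlib
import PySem

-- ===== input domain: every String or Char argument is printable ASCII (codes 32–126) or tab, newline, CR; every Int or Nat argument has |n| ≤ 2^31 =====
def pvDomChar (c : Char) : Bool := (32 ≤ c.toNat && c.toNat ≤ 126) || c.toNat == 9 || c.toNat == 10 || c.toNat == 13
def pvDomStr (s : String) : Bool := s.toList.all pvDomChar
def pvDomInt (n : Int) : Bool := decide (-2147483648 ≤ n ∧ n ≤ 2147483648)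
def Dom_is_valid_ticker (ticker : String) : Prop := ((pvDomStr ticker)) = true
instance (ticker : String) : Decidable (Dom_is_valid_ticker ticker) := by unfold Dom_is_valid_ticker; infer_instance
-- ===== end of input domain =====

-- B replaces upper() + dot-splitting + per-part isalpha with a single character scan
-- keeping a dot flag and the current segment length (alternative decomposition, no parts list).


-- ===== PORT A =====
def is_valid_ticker (ticker : String) : Bool :=
  if ticker.toList.isEmpty then false          -- `not ticker`
  else
    let t := PySem.Chars.upper ticker.toList   -- ticker = ticker.upper()
    if 6 < PySem.Chars.len t then false
    else
      let parts := PySem.Chars.splitOn t ['.'] -- the split of the Python source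
      if 2 < parts.length then false
      else parts.all PySem.Chars.strIsalpha    -- the for-loop of early returns

-- ===== PORT B =====
-- the for-loop of Source B: state = (seen_dot, seg)
def tickScan : List Char → Bool → Nat → Bool
  | [], _, seg => decide (0 < seg)
  | c :: rest, seenDot, seg =>
    if c = '.' then
      if seenDot || seg == 0 then false
      else tickScan rest true 0
    else if PySem.Chars.isalpha c then tickScan rest seenDot (seg + 1)
    else false

def is_valid_ticker_alt (ticker : String) : Bool :=
  if ticker.toList.isEmpty then false
  else if 6 < ticker.toList.length then false
  else tickScan ticker.toList false 0

-- ===== PRECONDITION & SPEC =====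
def Spec_is_valid_ticker (ticker : String) (out : Bool) : Prop := out = is_valid_ticker_alt ticker
instance (ticker : String) (out : Bool) : Decidable (Spec_is_valid_ticker ticker out) := by unfold Spec_is_valid_ticker; infer_instance

-- ===== CLAIM (what is proved, stated in full; the proofs are below) =====
def Claim_equal_is_valid_ticker : Prop := ∀ (ticker : String), Dom_is_valid_ticker ticker → Spec_is_valid_ticker ticker (is_valid_ticker ticker)

-- ===== LEMMAS AND PROOFS =====

-- proof-only reformulation of the dot split as a structural recursion
def splitParts : List Char → List Char → List (List Char)
  | pre, [] => [pre]
  | pre, c :: rest => if c = '.' then pre :: splitParts [] rest else splitParts (pre ++ [c]) rest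

theorem charLe_iff (a b : Char) : (a ≤ b) ↔ (a.toNat ≤ b.toNat) := by
  rw [Char.le_def, UInt32.le_iff_toNat_le]; rfl

theorem upperChar_of_not_lower (c : Char) (hl : PySem.Chars.islower c = false) :
    PySem.Chars.upperChar c = c := by
  simp [PySem.Chars.upperChar, hl]

theorem upperChar_isalpha (c : Char) :
    PySem.Chars.isalpha (PySem.Chars.upperChar c) = PySem.Chars.isalpha c := by
  by_cases hl : PySem.Chars.islower c = true
  · have hb : 97 ≤ c.toNat ∧ c.toNat ≤ 122 := by
      simpa [PySem.Chars.islower, charLe_iff] using hl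
    have hv : (Char.ofNat (c.toNat - 32)).toNat = c.toNat - 32 := by
      rw [Char.toNat_ofNat, if_pos (Or.inl (by omega))]
    have hu : PySem.Chars.isupper (PySem.Chars.upperChar c) = true := by
      simp only [PySem.Chars.upperChar, hl, if_true]
      simp only [PySem.Chars.isupper, charLe_iff, hv, Bool.and_eq_true, decide_eq_true_eq]
      constructor <;> [show 65 ≤ _ ; show _ ≤ 90] <;> omega
    simp [PySem.Chars.isalpha, hu, hl]
  · rw [upperChar_of_not_lower c (by simpa using hl)]

theorem upperChar_eq_dot_iff (c : Char) : (PySem.Chars.upperChar c = '.') ↔ c = '.' := by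
  by_cases hl : PySem.Chars.islower c = true
  · have hb : 97 ≤ c.toNat ∧ c.toNat ≤ 122 := by
      simpa [PySem.Chars.islower, charLe_iff] using hl
    have hv : (Char.ofNat (c.toNat - 32)).toNat = c.toNat - 32 := by
      rw [Char.toNat_ofNat, if_pos (Or.inl (by omega))]
    constructor <;> intro h
    · exfalso
      have : (PySem.Chars.upperChar c).toNat = 46 := by rw [h]; decide
      rw [PySem.Chars.upperChar, if_pos hl, hv] at this
      omega
    · exfalso; rw [h] at hb; revert hb; decide
  · rw [upperChar_of_not_lower c (by simpa using hl)]

-- split(".") computes splitParts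
theorem splitOn_go_eq (fuel : Nat) : ∀ (l cur : List Char) (accs : List (List Char)),
    l.length < fuel →
    PySem.Chars.splitOn.go ['.'] fuel l cur accs = accs.reverse ++ splitParts cur.reverse l := by
  induction fuel with
  | zero => intro l cur accs h; omega
  | succ fuel ih =>
    intro l cur accs h
    cases l with
    | nil => simp [PySem.Chars.splitOn.go, splitParts]
    | cons c rest =>
      rw [PySem.Chars.splitOn.go]
      by_cases hc : c = '.'
      · have hp : List.isPrefixOf ['.'] (c :: rest) = true := by
          simp [List.isPrefixOf, hc]
        simp only [hp, if_true, List.length_cons, List.drop_succ_cons, List.length_nil,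
          List.drop_zero]
        rw [ih rest [] (cur.reverse :: accs) (by simpa using Nat.lt_of_succ_lt_succ h)]
        simp [splitParts, hc]
      · have hp : List.isPrefixOf ['.'] (c :: rest) = false := by
          simp [List.isPrefixOf]; intro h'; exact absurd h'.symm hc
        simp only [hp, Bool.false_eq_true, if_false]
        rw [ih rest (c :: cur) accs (by simpa using Nat.lt_of_succ_lt_succ h)]
        simp [splitParts, hc]

theorem splitOn_eq_splitParts (s : List Char) :
    PySem.Chars.splitOn s ['.'] = splitParts [] s := by
  rw [PySem.Chars.splitOn, splitOn_go_eq (s.length + 1) s [] [] (by omega)]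
  simp

theorem splitParts_ne_nil (cs : List Char) : ∀ pre, splitParts pre cs ≠ [] := by
  induction cs with
  | nil => intro pre; simp [splitParts]
  | cons c rest ih =>
    intro pre
    by_cases hc : c = '.' <;> simp [splitParts, hc, ih]

theorem splitParts_all_false (cs : List Char) : ∀ pre, pre.all PySem.Chars.isalpha = false →
    (splitParts pre cs).all PySem.Chars.strIsalpha = false := by
  induction cs with
  | nil => intro pre h; simp [splitParts, PySem.Chars.strIsalpha, h]
  | cons c rest ih =>
    intro pre h
    by_cases hc : c = '.'
    · simp [splitParts, hc, PySem.Chars.strIsalpha, h]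
    · rw [splitParts, if_neg hc, ih (pre ++ [c]) (by simp_all)]

theorem strIsalpha_upper (p : List Char) :
    PySem.Chars.strIsalpha (PySem.Chars.upper p) = PySem.Chars.strIsalpha p := by
  simp [PySem.Chars.strIsalpha, PySem.Chars.upper, List.all_map, Function.comp_def,
    upperChar_isalpha]

theorem splitParts_upper (cs : List Char) : ∀ pre,
    splitParts (PySem.Chars.upper pre) (PySem.Chars.upper cs)
      = (splitParts pre cs).map PySem.Chars.upper := by
  induction cs with
  | nil => intro pre; simp [splitParts, PySem.Chars.upper]
  | cons c rest ih =>
    intro pre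
    have hdot : PySem.Chars.upperChar '.' = '.' := by decide
    by_cases hc : c = '.'
    · subst hc
      rw [show PySem.Chars.upper ('.' :: rest) = PySem.Chars.upperChar '.' :: PySem.Chars.upper rest from rfl,
        hdot, splitParts, if_pos rfl, splitParts, if_pos rfl]
      simp only [List.map_cons]
      rw [show (splitParts [] (PySem.Chars.upper rest) : List (List Char))
            = splitParts (PySem.Chars.upper []) (PySem.Chars.upper rest) from rfl, ih []]
    · have h2 : ¬ PySem.Chars.upperChar c = '.' := fun h => hc ((upperChar_eq_dot_iff c).mp h)
      rw [show PySem.Chars.upper (c :: rest) = PySem.Chars.upperChar c :: PySem.Chars.upper rest from rfl]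
      rw [splitParts, if_neg h2, splitParts, if_neg hc]
      rw [show PySem.Chars.upper pre ++ [PySem.Chars.upperChar c] = PySem.Chars.upper (pre ++ [c]) by simp [PySem.Chars.upper]]
      exact ih (pre ++ [c])

theorem tickScan_eq (cs : List Char) : ∀ (pre : List Char) (d : Bool) (seg : Nat),
    pre.all PySem.Chars.isalpha = true → (seg = 0 ↔ pre = []) →
    tickScan cs d seg =
      (decide ((splitParts pre cs).length ≤ (if d then 1 else 2))
        && (splitParts pre cs).all PySem.Chars.strIsalpha) := by
  induction cs with
  | nil =>
    intro pre d seg ha hs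
    have h1 : (0 + 1 ≤ if d = true then 1 else 2) := by cases d <;> simp
    simp only [tickScan, splitParts, List.length_cons, List.length_nil, List.all_cons,
      List.all_nil, Bool.and_true, PySem.Chars.strIsalpha]
    simp only [h1, decide_true, Bool.true_and, ha, Bool.and_true]
    cases pre with
    | nil => rw [hs.mpr rfl]; simp
    | cons a b =>
      have h0 : seg ≠ 0 := fun h => List.cons_ne_nil a b (hs.mp h)
      simp [Nat.pos_of_ne_zero h0]
  | cons c rest ih =>
    intro pre d seg ha hs
    by_cases hc : c = '.'
    · subst hc
      rw [tickScan, if_pos rfl, splitParts, if_pos rfl]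
      by_cases hd : d = true
      · subst hd
        rw [if_pos rfl]
        have hlen : ¬ ((splitParts [] rest).length + 1 ≤ 1) := by
          cases hsp : splitParts [] rest with
          | nil => exact absurd hsp (splitParts_ne_nil rest [])
          | cons x xs => simp
        simp [hlen]
      · simp only [Bool.not_eq_true] at hd; subst hd
        simp only [Bool.false_or, if_false, Bool.false_eq_true]
        by_cases h0 : seg == 0
        · have hpre : pre = [] := hs.mp (by simpa using h0)
          subst hpre
          simp only [h0, if_true]
          simp [PySem.Chars.strIsalpha]
        · simp only [h0, Bool.false_eq_true, if_false]
          rw [ih [] true 0 (by simp) (by simp)]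
          have hpre : pre ≠ [] := fun h => by simp [hs.mpr h] at h0
          have hsa : PySem.Chars.strIsalpha pre = true := by
            simp [PySem.Chars.strIsalpha, hpre, ha]
          simp only [List.length_cons, List.all_cons, hsa, Bool.true_and]
          congr 1
          simp
    · rw [tickScan, if_neg hc, splitParts, if_neg hc]
      by_cases hal : PySem.Chars.isalpha c = true
      · rw [if_pos hal, ih (pre ++ [c]) d (seg + 1) (by simp [ha, hal]) (by simp)]
      · rw [if_neg hal,
          splitParts_all_false rest (pre ++ [c]) (by simp [Bool.not_eq_true] at hal; simp [hal])]
        simp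

theorem ab_eq (ticker : String) : is_valid_ticker ticker = is_valid_ticker_alt ticker := by
  unfold is_valid_ticker is_valid_ticker_alt
  by_cases he : ticker.toList.isEmpty
  · simp [he]
  · simp only [he, Bool.false_eq_true, if_false]
    have hlen : PySem.Chars.len (PySem.Chars.upper ticker.toList) = (ticker.toList.length : Int) := by
      simp [PySem.Chars.len, PySem.Chars.upper]
    rw [hlen]
    by_cases h6 : 6 < ticker.toList.length
    · rw [if_pos (by exact_mod_cast h6), if_pos h6]
    · rw [if_neg (by exact_mod_cast h6), if_neg h6]
      rw [splitOn_eq_splitParts,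
        show (splitParts [] (PySem.Chars.upper ticker.toList) : List (List Char))
          = splitParts (PySem.Chars.upper []) (PySem.Chars.upper ticker.toList) from rfl,
        splitParts_upper,
        tickScan_eq ticker.toList [] false 0 (by simp) (by simp)]
      simp only [List.length_map, List.all_map, Function.comp_def, strIsalpha_upper,
        Bool.false_eq_true, if_false]
      by_cases h2 : 2 < (splitParts [] ticker.toList).length
      · rw [if_pos h2, decide_eq_false (by omega), Bool.false_and]
      · rw [if_neg h2, decide_eq_true (by omega : (splitParts [] ticker.toList).length ≤ 2), Bool.true_and]

-- ===== VERDICT (by name: the statement is the Claim_ definition above) =====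
theorem is_valid_ticker_spec : Claim_equal_is_valid_ticker := by
  intro ticker _
  unfold Spec_is_valid_ticker
  exact ab_eq ticker
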